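-- pv_equiv track=rewrite | github.com/fdeyesx/redoned-tasks | 5/15.py | f
-- ===== SOURCE A (Python) =====
-- def f(n):
--     s = str(bin(n))[2:]
--     n1 = 0
--     while n1 < 2:
--         if len(list(s))%2 == 0:
--             s = s + '10'
--         else:
--             s = '11' + s
--         n1+=1
--     return int(s,2)
-- ===== SOURCE B (Python) =====
-- def f(n):
--     # Appending two chars never changes the parity of len(s), so both loop
--     # iterations of the original take the same branch; closed form instead.
--     L = max(1, n.bit_length())
--     if L % 2 == 0:
--         return 16 * n + 10
--     return 15 * 2 ** L + n
-- ===== Notes on version B (the rewrite author's own statement) =====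
-- stated objective: simpler
-- what changed: Replaced the two-iteration string-building loop and base-2 reparse by a closed arithmetic form: both iterations take the same branch (appending two chars preserves length parity), so the result is 16*n+10 for even bit-string length and 15*2^L+n for odd length L.
import Mathlib
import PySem

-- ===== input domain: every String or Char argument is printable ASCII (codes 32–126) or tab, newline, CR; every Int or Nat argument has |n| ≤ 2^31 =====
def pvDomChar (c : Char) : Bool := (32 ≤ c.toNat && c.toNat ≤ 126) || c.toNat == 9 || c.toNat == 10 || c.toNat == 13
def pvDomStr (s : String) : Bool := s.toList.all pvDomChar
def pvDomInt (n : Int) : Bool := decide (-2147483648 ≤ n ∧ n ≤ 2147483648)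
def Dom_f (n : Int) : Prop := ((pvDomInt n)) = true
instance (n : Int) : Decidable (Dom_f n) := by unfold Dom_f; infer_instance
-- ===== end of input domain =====

-- B replaces A's two-iteration string-building loop by a closed arithmetic form
-- (both iterations take the same branch since appending two chars keeps length parity).

-- ===== PORT A =====
-- binary digits of m, most significant first; [] for m = 0 (the digit part of bin(m))
def pvToBinGo (m : Nat) : List Char :=
  if h : m = 0 then []
  else pvToBinGo (m / 2) ++ [if m % 2 == 1 then '1' else '0']
decreasing_by exact Nat.div_lt_self (Nat.pos_of_ne_zero h) one_lt_two

-- port of str(bin(n))[2:]; for n < 0 the slice keeps the 'b' (int(s,2) then raises → outside Pre_)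
def pvBinStr (n : Int) : List Char :=
  let digits := if n.natAbs = 0 then ['0'] else pvToBinGo n.natAbs
  if n < 0 then 'b' :: digits else digits

-- port of int(s, 2) on the binary-digit strings A reaches inside Pre_
def pvParseBin (s : List Char) : Int :=
  s.foldl (fun a c => 2 * a + (if c = '1' then 1 else 0)) 0

-- the while-loop: n1 counts down from 2
def pvLoopA : Nat → List Char → List Char
  | 0, s => s
  | k + 1, s => pvLoopA k (if s.length % 2 == 0 then s ++ ['1', '0'] else '1' :: '1' :: s)

def f (n : Int) : Int := pvParseBin (pvLoopA 2 (pvBinStr n))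

-- ===== PORT B =====
-- port of n.bit_length() (on the absolute value, as in Python)
def pvBitLen (m : Nat) : Nat :=
  if h : m = 0 then 0 else pvBitLen (m / 2) + 1
decreasing_by exact Nat.div_lt_self (Nat.pos_of_ne_zero h) one_lt_two

def f_alt (n : Int) : Int :=
  let L := max 1 (pvBitLen n.natAbs)
  if L % 2 == 0 then 16 * n + 10 else 15 * 2 ^ L + n

-- ===== PRECONDITION & SPEC =====
-- Pre_ excludes n < 0, where A raises ValueError (int('b…', 2) after bin(n)[2:] keeps the 'b').
def Pre_f (n : Int) : Prop := 0 ≤ n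
instance (n : Int) : Decidable (Pre_f n) := by unfold Pre_f; infer_instance
def pvWitness_f : Int := (5)
def Spec_f (n : Int) (out : Int) : Prop := out = f_alt n
instance (n : Int) (out : Int) : Decidable (Spec_f n out) := by unfold Spec_f; infer_instance

-- ===== CLAIM (what is proved, stated in full; the proofs are below) =====
def Claim_equal_f : Prop := ∀ (n : Int), Dom_f n → Pre_f n → Spec_f n (f n)

-- ===== LEMMAS AND PROOFS =====

lemma pv_foldl_acc (l : List Char) (a : Int) :
    l.foldl (fun a c => 2 * a + (if c = '1' then 1 else 0)) a
      = a * 2 ^ l.length + l.foldl (fun a c => 2 * a + (if c = '1' then 1 else 0)) 0 := by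
  induction l generalizing a with
  | nil => simp
  | cons c l ih =>
    simp only [List.foldl_cons, List.length_cons]
    rw [ih (2 * a + _), ih (2 * 0 + _)]
    ring

lemma pv_parse_append (s t : List Char) :
    pvParseBin (s ++ t) = pvParseBin s * 2 ^ t.length + pvParseBin t := by
  unfold pvParseBin
  rw [List.foldl_append, pv_foldl_acc]

lemma pv_len_go (m : Nat) : (pvToBinGo m).length = pvBitLen m := by
  induction m using pvToBinGo.induct with
  | case1 => simp [pvToBinGo, pvBitLen]
  | case2 m h ih =>
    rw [pvToBinGo, pvBitLen]
    simp [h, ih]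

lemma pv_parse_go (m : Nat) : pvParseBin (pvToBinGo m) = (m : Int) := by
  induction m using pvToBinGo.induct with
  | case1 => simp [pvToBinGo, pvParseBin]
  | case2 m h ih =>
    rw [pvToBinGo, dif_neg h, pv_parse_append, ih]
    have hd2 : pvParseBin [if m % 2 == 1 then '1' else '0'] = ((m % 2 : Nat) : Int) := by
      rcases Nat.mod_two_eq_zero_or_one m with h2 | h2 <;> simp [h2, pvParseBin]
    rw [hd2]
    simp only [List.length_singleton, pow_one]
    omega

lemma pv_bitLen_pos (m : Nat) (h : m ≠ 0) : 1 ≤ pvBitLen m := by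
  rw [pvBitLen]; simp [h]

lemma pv_loop_even (s : List Char) (h : s.length % 2 = 0) :
    pvLoopA 2 s = s ++ ['1', '0', '1', '0'] := by
  have h1 : (s.length % 2 == 0) = true := by simp [h]
  simp [pvLoopA, h1, List.length_append]

lemma pv_loop_odd (s : List Char) (h : s.length % 2 = 1) :
    pvLoopA 2 s = '1' :: '1' :: '1' :: '1' :: s := by
  have h1 : (s.length % 2 == 0) = false := by simp [h]
  have h2 : ((s.length + 1 + 1) % 2 == 0) = false := by simp; omega
  simp [pvLoopA, h1, h2]

lemma pv_main (m : Nat) : f (m : Int) = f_alt (m : Int) := by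
  have habs : (m : Int).natAbs = m := Int.natAbs_natCast m
  have hneg : ¬ ((m : Int) < 0) := by omega
  set digits : List Char := if m = 0 then ['0'] else pvToBinGo m with hd
  have hbin : pvBinStr (m : Int) = digits := by
    simp [pvBinStr, habs, hneg, hd]
  have hlen : digits.length = max 1 (pvBitLen m) := by
    by_cases h0 : m = 0
    · simp [hd, h0, pvBitLen]
    · have := pv_bitLen_pos m h0
      simp [hd, h0, pv_len_go]
      omega
  have hval : pvParseBin digits = (m : Int) := by
    by_cases h0 : m = 0
    · simp [hd, h0, pvParseBin]
    · simp [hd, h0, pv_parse_go]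
  unfold f f_alt
  rw [hbin, habs]
  by_cases hp : (max 1 (pvBitLen m)) % 2 = 0
  · have hlp : digits.length % 2 = 0 := by rw [hlen]; exact hp
    have h10 : pvParseBin ['1', '0', '1', '0'] = 10 := by decide
    rw [pv_loop_even digits hlp, pv_parse_append, h10, hval]
    simp [hp]
    ring
  · have hlp : digits.length % 2 = 1 := by rw [hlen]; omega
    have h15 : pvParseBin ['1', '1', '1', '1'] = 15 := by decide
    have hsplit : ('1' :: '1' :: '1' :: '1' :: digits) = ['1','1','1','1'] ++ digits := rfl
    rw [pv_loop_odd digits hlp, hsplit, pv_parse_append, h15, hval, hlen]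
    simp [hp]

-- ===== VERDICT (by name: the statement is the Claim_ definition above) =====
theorem f_spec : Claim_equal_f := by
  intro n _ hpre
  have h := pv_main n.toNat
  rw [Int.toNat_of_nonneg hpre] at h
  unfold Spec_f
  exact h
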